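-- pv_equiv track=rewrite | github.com/Pixtini/GameFiles | Test Game/ZombieRabbitsGrave.py | popping
-- ===== SOURCE A (Python) =====
-- def popping(wins):
--     to_be_popped = []
--     for x, win in enumerate(wins):
--         if wins.get(win)[2:6] == [0,0,0,0]:
--             to_be_popped.append(win)
--     for x, pop in enumerate(to_be_popped):
--         wins.pop(pop)
--     return wins
-- ===== SOURCE B (Python) =====
-- def popping(wins):
--     # explicit-stack back-to-front traversal of the items, then reverse
--     stack = list(wins.items())
--     out = []
--     while stack:
--         k, v = stack.pop()
--         if v[2:6] != [0, 0, 0, 0]: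
--             out.append((k, v))
--     out.reverse()
--     wins.clear()
--     wins.update(out)
--     return wins
-- ===== Notes on version B (the rewrite author's own statement) =====
-- stated objective: alternative
-- what changed: A collects doomed keys into a list and then pops them one by one in a second pass over the dict; B traverses the item list back-to-front with an explicit stack, accumulating the kept pairs and reversing once, then replaces the dict contents with clear()+update(), so the key list, the key lookups and the pop loop disappear.
import Mathlib
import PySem

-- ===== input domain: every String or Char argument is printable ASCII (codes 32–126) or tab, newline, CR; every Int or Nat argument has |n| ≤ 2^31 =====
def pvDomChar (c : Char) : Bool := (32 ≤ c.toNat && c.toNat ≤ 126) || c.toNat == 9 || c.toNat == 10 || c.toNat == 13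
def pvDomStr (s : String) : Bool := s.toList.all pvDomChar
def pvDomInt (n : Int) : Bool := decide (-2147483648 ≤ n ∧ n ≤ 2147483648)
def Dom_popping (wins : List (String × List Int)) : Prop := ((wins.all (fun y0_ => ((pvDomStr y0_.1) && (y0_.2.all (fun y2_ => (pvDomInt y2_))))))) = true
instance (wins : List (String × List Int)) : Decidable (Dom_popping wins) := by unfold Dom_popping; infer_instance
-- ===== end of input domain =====

-- B replaces A's collect-keys-then-pop-loop pair by one explicit-stack back-to-front pass
-- over the item list (accumulate kept pairs, reverse once), then clear()+update() (same
-- in-place mutation of the argument dict); objective: alternative decomposition.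

-- ===== PORT A =====
-- A: collect into to_be_popped every key whose value's [2:6] slice is [0,0,0,0], then pop each.
def popping (wins : List (String × List Int)) : List (String × List Int) :=
  let d := PySem.Dict.ofList wins
  let toBePopped :=
    d.keys.foldl (fun acc win =>
      if PySem.List.slice (d.getD win []) (some 2) (some 6) = ([0, 0, 0, 0] : List Int)
      then acc ++ [win] else acc) []
  (toBePopped.foldl (fun e k => e.erase k) d).items

-- ===== PORT B =====
-- B helper: the 'while stack: k, v = stack.pop(); …' loop. stack.pop() takes the LAST
-- element, so the loop walks the stack from its end: we recurse over the reversed stack,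
-- appending kept pairs to out exactly as the Python loop does.
def whileStack : List (String × List Int) → List (String × List Int) → List (String × List Int)
  | out, [] => out
  | out, (k, v) :: poppedRest =>
      whileStack
        (if PySem.List.slice v (some 2) (some 6) ≠ ([0, 0, 0, 0] : List Int)
         then out ++ [(k, v)] else out)
        poppedRest

-- B: stack = list(wins.items()); run the while-pop loop; out.reverse();
-- wins.clear(); wins.update(out); return wins
def popping_alt (wins : List (String × List Int)) : List (String × List Int) :=
  let stack := (PySem.Dict.ofList wins).items
  let out := whileStack [] stack.reverse
  (PySem.Dict.empty.update out.reverse).items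

-- ===== PRECONDITION & SPEC =====
def Spec_popping (wins : List (String × List Int)) (out : List (String × List Int)) : Prop := out = popping_alt wins
instance (wins : List (String × List Int)) (out : List (String × List Int)) : Decidable (Spec_popping wins out) := by unfold Spec_popping; infer_instance

-- ===== CLAIM (what is proved, stated in full; the proofs are below) =====
def Claim_equal_popping : Prop := ∀ (wins : List (String × List Int)), Dom_popping wins → Spec_popping wins (popping wins)

-- ===== LEMMAS AND PROOFS =====

-- the while-pop loop is a fold of append-if over its stack argument
theorem whileStack_eq_foldl (stack out : List (String × List Int)) :
    whileStack out stack
      = stack.foldl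
          (fun out kv =>
            if PySem.List.slice kv.2 (some 2) (some 6) ≠ ([0, 0, 0, 0] : List Int)
            then out ++ [kv] else out) out := by
  induction stack generalizing out with
  | nil => rfl
  | cons p rest ih => obtain ⟨k, v⟩ := p; simp only [whileStack, List.foldl_cons, ih]

-- B's stack loop and final reverse compute a filter of the item list
theorem stack_loop_eq_filter (l : List (String × List Int)) :
    (whileStack [] l.reverse).reverse
      = l.filter (fun p => !(PySem.List.slice p.2 (some 2) (some 6) = ([0, 0, 0, 0] : List Int))) := by
  rw [whileStack_eq_foldl, PySem.List.foldl_append_ite_eq_filter]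
  rw [List.nil_append, ← List.filter_reverse, List.reverse_reverse]
  apply List.filter_congr
  intro p _
  by_cases h : PySem.List.slice p.2 (some 2) (some 6) = ([0, 0, 0, 0] : List Int) <;> simp [h]

-- a fold of erase over a key list filters out exactly the items with those keys
theorem items_foldl_erase {ν : Type} (ks : List String) (d : PySem.Dict String ν) :
    (ks.foldl (fun e k => e.erase k) d).items
      = d.items.filter (fun p => !ks.contains p.1) := by
  induction ks generalizing d with
  | nil => simp
  | cons k ks ih =>
      rw [List.foldl_cons, ih]
      simp only [PySem.Dict.erase, List.filter_filter]
      apply List.filter_congr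
      intro p _
      by_cases h : p.1 = k <;> simp [h]

-- an update of the empty dict with a Nodup-keyed list has exactly that list as items
theorem items_update_empty {ν : Type} (ps : List (String × ν)) (h : (ps.map Prod.fst).Nodup) :
    ((PySem.Dict.empty : PySem.Dict String ν).update ps).items = ps := by
  have := PySem.Dict.items_foldl_insert_fresh (l := ps) (k := Prod.fst) (v := Prod.snd)
      (d := (PySem.Dict.empty : PySem.Dict String ν))
      (by intro a _; simp) h
  simpa [PySem.Dict.update] using this

-- ===== VERDICT (by name: the statement is the Claim_ definition above) =====
theorem popping_spec : Claim_equal_popping := by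
  intro wins _
  unfold Spec_popping popping popping_alt
  dsimp only
  set d := PySem.Dict.ofList wins with hd
  have hnd : d.keys.Nodup := PySem.Dict.nodup_keys_ofList wins
  rw [PySem.List.foldl_append_ite_eq_filter]
  rw [items_foldl_erase, stack_loop_eq_filter]
  rw [items_update_empty]
  · simp only [List.nil_append]
    apply List.filter_congr
    intro p hp
    obtain ⟨k0, v0⟩ := p
    have hget : d.getD k0 [] = v0 := PySem.Dict.getD_of_mem_items d hp hnd []
    have hmemk : k0 ∈ d.keys := PySem.Dict.mem_keys_of_mem_items d hp
    by_cases h : PySem.List.slice v0 (some 2) (some 6) = ([0, 0, 0, 0] : List Int)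
    · simp [h, hget, hmemk, List.mem_filter]
    · simp [h, hget, List.mem_filter]
  · exact ((List.filter_sublist).map Prod.fst).nodup hnd
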